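-- pv_equiv track=rewrite | github.com/kevlinsky/machine-learning-itis | 15-11-2021/diofant.py | duplicates_exist
-- ===== SOURCE A (Python) =====
-- from collections import Counter
--
-- PAIRS_NUM = 5
--
-- def duplicates_exist(params):
--     p = []
--     for param in params:
--         p.append(tuple(param))
--     cnt = Counter(p)
--     count = 0
--     for value in cnt.values():
--         if value > 1:
--             count += value
--
--     return False if count < PAIRS_NUM // 2 else True
-- ===== SOURCE B (Python) =====
-- def duplicates_exist(params):
--     seen = set()
--     for param in params:
--         t = tuple(param)
--         if t in seen:
--             return True
--         seen.add(t)
--     return False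
-- ===== Notes on version B (the rewrite author's own statement) =====
-- stated objective: simpler
-- what changed: Replaced Counter-building plus a sum of multiplicities against PAIRS_NUM//2 by a single early-exit scan with a seen-set: since PAIRS_NUM//2 == 2 and any duplicated tuple contributes at least 2 to A's sum, the threshold test is exactly 'some tuple repeats'.
import Mathlib
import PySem

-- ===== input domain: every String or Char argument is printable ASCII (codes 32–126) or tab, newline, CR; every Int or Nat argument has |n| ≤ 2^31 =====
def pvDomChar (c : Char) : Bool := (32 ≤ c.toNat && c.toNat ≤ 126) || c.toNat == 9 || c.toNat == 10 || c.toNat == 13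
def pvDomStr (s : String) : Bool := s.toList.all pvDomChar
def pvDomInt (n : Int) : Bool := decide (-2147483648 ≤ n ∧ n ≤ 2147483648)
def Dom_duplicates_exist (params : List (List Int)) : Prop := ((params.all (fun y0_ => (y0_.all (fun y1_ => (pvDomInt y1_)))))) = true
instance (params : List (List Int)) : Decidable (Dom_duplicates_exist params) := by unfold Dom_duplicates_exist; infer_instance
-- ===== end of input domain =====

-- B replaces A's Counter + sum-of-multiplicities threshold by an early-exit seen-set scan
-- (the threshold count < PAIRS_NUM // 2 = 2 holds exactly when no tuple repeats): simpler.

-- ===== PORT A =====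
def PAIRS_NUM : Int := 5

def duplicates_exist (params : List (List Int)) : Bool :=
  let p := params.foldl (fun acc param => acc ++ [param]) ([] : List (List Int))
  let cnt := PySem.Dict.counter p
  let count := cnt.values.foldl (fun count value => if value > 1 then count + value else count) (0 : Int)
  if count < PySem.Int.floordiv PAIRS_NUM 2 then false else true

-- ===== PORT B =====
def dupScan (seen : PySem.Set (List Int)) : List (List Int) → Bool
  | [] => false
  | param :: rest =>
    if PySem.Set.contains seen param then true
    else dupScan (PySem.Set.add seen param) rest

def duplicates_exist_alt (params : List (List Int)) : Bool :=
  dupScan PySem.Set.empty params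

-- ===== PRECONDITION & SPEC =====
def Spec_duplicates_exist (params : List (List Int)) (out : Bool) : Prop := out = duplicates_exist_alt params
instance (params : List (List Int)) (out : Bool) : Decidable (Spec_duplicates_exist params out) := by unfold Spec_duplicates_exist; infer_instance

-- ===== CLAIM (what is proved, stated in full; the proofs are below) =====
def Claim_equal_duplicates_exist : Prop := ∀ (params : List (List Int)), Dom_duplicates_exist params → Spec_duplicates_exist params (duplicates_exist params)

-- ===== LEMMAS AND PROOFS =====

/-- B's scan hits `true` exactly when some element is already seen or some element repeats. -/
theorem dupScan_true_iff (xs : List (List Int)) (seen : PySem.Set (List Int)) :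
    dupScan seen xs = true ↔ (∃ x ∈ xs, x ∈ seen) ∨ ¬ xs.Nodup := by
  induction xs generalizing seen with
  | nil => simp [dupScan]
  | cons a rest ih =>
    simp only [dupScan]
    by_cases h : a ∈ seen
    · simp only [PySem.Set.contains, List.contains_eq_mem, h, decide_true, if_true]
      simp only [true_iff]
      exact Or.inl ⟨a, List.mem_cons_self, h⟩
    · simp only [PySem.Set.contains, List.contains_eq_mem, h, decide_false,
        Bool.false_eq_true, if_false]
      rw [ih]
      constructor
      · rintro (⟨x, hx, hxs⟩ | hnd)
        · rcases (PySem.Set.mem_add seen a x).mp hxs with hs | rfl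
          · exact Or.inl ⟨x, List.mem_cons_of_mem _ hx, hs⟩
          · exact Or.inr (by simp [List.nodup_cons]; intro h'; exact absurd hx (by simp_all))
        · exact Or.inr (by simp [List.nodup_cons]; intro _; exact hnd)
      · rintro (⟨x, hx, hxs⟩ | hnd)
        · rcases List.mem_cons.mp hx with rfl | hx'
          · exact absurd hxs h
          · exact Or.inl ⟨x, hx', (PySem.Set.mem_add seen a x).mpr (Or.inl hxs)⟩
        · rw [List.nodup_cons] at hnd
          push Not at hnd
          by_cases hmem : a ∈ rest
          · exact Or.inl ⟨a, hmem, (PySem.Set.mem_add seen a a).mpr (Or.inr rfl)⟩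
          · exact Or.inr (hnd hmem)

theorem alt_true_iff (params : List (List Int)) :
    duplicates_exist_alt params = true ↔ ¬ params.Nodup := by
  rw [duplicates_exist_alt, dupScan_true_iff]
  simp [PySem.Set.empty]

/-- A's accumulating fold is the sum of the values exceeding 1. -/
theorem foldl_if_sum (vs : List Int) (acc : Int) :
    vs.foldl (fun c v => if v > 1 then c + v else c) acc
      = acc + ((vs.filter (fun v => 1 < v)).sum) := by
  induction vs generalizing acc with
  | nil => simp
  | cons v vs ih =>
    by_cases h : 1 < v
    · simp [List.foldl_cons, ih, h]; ring
    · simp [List.foldl_cons, ih, h]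

theorem a_true_iff (params : List (List Int)) :
    duplicates_exist params = true ↔ ¬ params.Nodup := by
  unfold duplicates_exist
  rw [PySem.List.foldl_append_singleton]
  simp only [List.nil_append]
  have hv : (PySem.Dict.counter params).values
      = (PySem.Set.ofList params).map (fun k => (params.count k : Int)) := by
    show ((PySem.Dict.counter params).items.map (·.2)) = _
    rw [PySem.Dict.items_counter]
    simp
  have h52 : PySem.Int.floordiv PAIRS_NUM 2 = 2 := by decide
  simp only [hv, foldl_if_sum, h52]
  set S := ((PySem.Set.ofList params).map (fun k => (params.count k : Int))).filter
      (fun v => 1 < v) with hS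
  constructor
  · intro h
    split_ifs at h with hlt
    intro hnd
    apply hlt
    have : S = [] := by
      rw [hS, List.filter_eq_nil_iff]
      intro v hv'
      rcases List.mem_map.mp hv' with ⟨k, _, rfl⟩
      have := List.nodup_iff_count_le_one.mp hnd k
      simp only [decide_eq_true_eq]
      omega
    simp [this]
  · intro hnd
    have ⟨a, ha⟩ : ∃ a, 1 < params.count a := by
      by_contra hc
      push Not at hc
      exact hnd (List.nodup_iff_count_le_one.mpr (fun a => hc a))
    have hmem : (params.count a : Int) ∈ S := by
      rw [hS]
      refine List.mem_filter.mpr ⟨List.mem_map.mpr ⟨a, ?_, rfl⟩, by simp; exact_mod_cast ha⟩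
      exact (PySem.Set.mem_ofList params a).mpr (List.count_pos_iff.mp (by omega))
    have hge : (2 : Int) ≤ S.sum := by
      have hnn : ∀ x ∈ S, (0 : Int) ≤ x := by
        intro x hx
        have := (List.mem_filter.mp (hS ▸ hx)).2
        simp at this; omega
      have := List.single_le_sum hnn _ hmem
      omega
    rw [if_neg (by omega)]

-- ===== VERDICT (by name: the statement is the Claim_ definition above) =====
theorem duplicates_exist_spec : Claim_equal_duplicates_exist := by
  intro params _
  unfold Spec_duplicates_exist
  have h1 := a_true_iff params
  have h2 := alt_true_iff params
  cases hA : duplicates_exist params <;> cases hB : duplicates_exist_alt params <;>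
    simp_all
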